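-- pv_equiv track=rewrite | github.com/ns-bguide/compositional_analysis | export_family_templates.py | categorize_families
-- ===== SOURCE A (Python) =====
-- from collections import OrderedDict
--
-- def categorize_families(families):
--     """Organize families by type/domain."""
--
--     categories = OrderedDict()
--
--     # Injury/fracture families
--     categories['Injury & Fracture Families'] = OrderedDict()
--     for name, details in families.items():
--         if 'injury' in name or 'fracture' in name:
--             categories['Injury & Fracture Families'][name] = details
--
--     # Toxic/poisoning families
--     categories['Toxic & Poisoning Families'] = OrderedDict()
--     for name, details in families.items():
--         if 'toxic' in name or 'poison' in name:
--             categories['Toxic & Poisoning Families'][name] = details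
--
--     # Condition families
--     categories['Condition Families'] = OrderedDict()
--     for name, details in families.items():
--         if 'condition' in name and name not in categories['Toxic & Poisoning Families']:
--             categories['Condition Families'][name] = details
--
--     # Mechanism/external cause families
--     categories['Mechanism & External Cause Families'] = OrderedDict()
--     for name, details in families.items():
--         if 'mechanism' in name:
--             categories['Mechanism & External Cause Families'][name] = details
--
--     # Encounter families
--     categories['Encounter-Based Families'] = OrderedDict()
--     for name, details in families.items():
--         if 'encounter' in name and name not in categories['Injury & Fracture Families'] \
--            and name not in categories['Toxic & Poisoning Families'] \
--            and name not in categories['Mechanism & External Cause Families']: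
--             categories['Encounter-Based Families'][name] = details
--
--     # Auto-generated families
--     categories['Auto-Generated Families'] = OrderedDict()
--     for name, details in families.items():
--         if name.startswith('auto_'):
--             categories['Auto-Generated Families'][name] = details
--
--     # Miscellaneous
--     categories['Other Families'] = OrderedDict()
--     for name, details in families.items():
--         # Add if not already in any category
--         found = False
--         for cat_families in categories.values():
--             if name in cat_families:
--                 found = True
--                 break
--         if not found:
--             categories['Other Families'][name] = details
--
--     # Remove empty categories
--     return OrderedDict((k, v) for k, v in categories.items() if v)
-- ===== SOURCE B (Python) =====
-- from collections import OrderedDict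
--
-- def categorize_families(families):
--     """Organize families by type/domain (single pass over the items)."""
--     inj_d = OrderedDict()
--     tox_d = OrderedDict()
--     cond_d = OrderedDict()
--     mech_d = OrderedDict()
--     enc_d = OrderedDict()
--     auto_d = OrderedDict()
--     other_d = OrderedDict()
--     for name, details in families.items():
--         injury = 'injury' in name or 'fracture' in name
--         toxic = 'toxic' in name or 'poison' in name
--         condition = 'condition' in name and not toxic
--         mechanism = 'mechanism' in name
--         encounter = 'encounter' in name and not injury and not toxic and not mechanism
--         auto = name.startswith('auto_')
--         other = not (injury or toxic or condition or mechanism or encounter or auto)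
--         if injury: inj_d[name] = details
--         if toxic: tox_d[name] = details
--         if condition: cond_d[name] = details
--         if mechanism: mech_d[name] = details
--         if encounter: enc_d[name] = details
--         if auto: auto_d[name] = details
--         if other: other_d[name] = details
--     result = OrderedDict()
--     for lab, b in [('Injury & Fracture Families', inj_d),
--                    ('Toxic & Poisoning Families', tox_d),
--                    ('Condition Families', cond_d),
--                    ('Mechanism & External Cause Families', mech_d),
--                    ('Encounter-Based Families', enc_d),
--                    ('Auto-Generated Families', auto_d),
--                    ('Other Families', other_d)]:
--         if b:
--             result[lab] = b
--     return result
-- ===== Notes on version B (the rewrite author's own statement) =====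
-- stated objective: faster
-- what changed: Replaces A's seven separate passes over the dict (each with membership lookups into earlier buckets, and an inner scan over all categories for 'Other') by a single pass that computes all seven category flags per name from the substring tests alone and fills seven pre-ordered buckets at once.
import Mathlib
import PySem

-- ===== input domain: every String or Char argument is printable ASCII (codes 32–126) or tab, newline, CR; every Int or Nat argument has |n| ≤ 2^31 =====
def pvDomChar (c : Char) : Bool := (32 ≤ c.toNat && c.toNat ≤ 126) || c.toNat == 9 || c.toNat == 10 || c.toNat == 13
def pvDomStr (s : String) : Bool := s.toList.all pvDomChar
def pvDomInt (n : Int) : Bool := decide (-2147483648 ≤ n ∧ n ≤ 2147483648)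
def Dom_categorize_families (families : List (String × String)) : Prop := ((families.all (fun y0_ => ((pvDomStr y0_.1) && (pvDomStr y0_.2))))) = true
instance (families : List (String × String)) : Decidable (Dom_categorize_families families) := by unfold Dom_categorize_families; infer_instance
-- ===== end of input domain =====

-- B replaces A's seven passes over the dict (one per category, with membership scans) by a single
-- pass that computes all category flags per name and appends into seven pre-ordered buckets.

-- ===== PORT A =====
def categorize_families (families : List (String × String)) : List (String × List (String × String)) :=
  let b1 := families.foldl (fun d p => if PySem.Str.isIn "injury" p.1 || PySem.Str.isIn "fracture" p.1 then d.insert p.1 p.2 else d) PySem.Dict.empty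
  let b2 := families.foldl (fun d p => if PySem.Str.isIn "toxic" p.1 || PySem.Str.isIn "poison" p.1 then d.insert p.1 p.2 else d) PySem.Dict.empty
  let b3 := families.foldl (fun d p => if PySem.Str.isIn "condition" p.1 && !(b2.contains p.1) then d.insert p.1 p.2 else d) PySem.Dict.empty
  let b4 := families.foldl (fun d p => if PySem.Str.isIn "mechanism" p.1 then d.insert p.1 p.2 else d) PySem.Dict.empty
  let b5 := families.foldl (fun d p => if PySem.Str.isIn "encounter" p.1 && !(b1.contains p.1) && !(b2.contains p.1) && !(b4.contains p.1) then d.insert p.1 p.2 else d) PySem.Dict.empty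
  let b6 := families.foldl (fun d p => if PySem.Str.startswith p.1 "auto_" then d.insert p.1 p.2 else d) PySem.Dict.empty
  let b7 := families.foldl (fun d p =>
      if b1.contains p.1 || b2.contains p.1 || b3.contains p.1 || b4.contains p.1 || b5.contains p.1 || b6.contains p.1 || d.contains p.1
      then d else d.insert p.1 p.2) PySem.Dict.empty
  (([("Injury & Fracture Families", b1), ("Toxic & Poisoning Families", b2),
     ("Condition Families", b3), ("Mechanism & External Cause Families", b4),
     ("Encounter-Based Families", b5), ("Auto-Generated Families", b6),
     ("Other Families", b7)].filter (fun p => !p.2.items.isEmpty)).map (fun p => (p.1, p.2.items)))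

-- ===== PORT B =====
def pvBStep (s : PySem.Dict String String × PySem.Dict String String × PySem.Dict String String ×
      PySem.Dict String String × PySem.Dict String String × PySem.Dict String String × PySem.Dict String String)
    (p : String × String) :
    PySem.Dict String String × PySem.Dict String String × PySem.Dict String String ×
      PySem.Dict String String × PySem.Dict String String × PySem.Dict String String × PySem.Dict String String :=
  let name := p.1
  let injury := PySem.Str.isIn "injury" name || PySem.Str.isIn "fracture" name
  let toxic := PySem.Str.isIn "toxic" name || PySem.Str.isIn "poison" name
  let condition := PySem.Str.isIn "condition" name && !toxic
  let mechanism := PySem.Str.isIn "mechanism" name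
  let encounter := PySem.Str.isIn "encounter" name && !injury && !toxic && !mechanism
  let auto := PySem.Str.startswith name "auto_"
  let other := !(injury || toxic || condition || mechanism || encounter || auto)
  ((if injury then s.1.insert name p.2 else s.1),
   (if toxic then s.2.1.insert name p.2 else s.2.1),
   (if condition then s.2.2.1.insert name p.2 else s.2.2.1),
   (if mechanism then s.2.2.2.1.insert name p.2 else s.2.2.2.1),
   (if encounter then s.2.2.2.2.1.insert name p.2 else s.2.2.2.2.1),
   (if auto then s.2.2.2.2.2.1.insert name p.2 else s.2.2.2.2.2.1),
   (if other then s.2.2.2.2.2.2.insert name p.2 else s.2.2.2.2.2.2))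

def categorize_families_alt (families : List (String × String)) : List (String × List (String × String)) :=
  let s := families.foldl pvBStep
      (PySem.Dict.empty, PySem.Dict.empty, PySem.Dict.empty, PySem.Dict.empty, PySem.Dict.empty, PySem.Dict.empty, PySem.Dict.empty)
  ([("Injury & Fracture Families", s.1), ("Toxic & Poisoning Families", s.2.1),
    ("Condition Families", s.2.2.1), ("Mechanism & External Cause Families", s.2.2.2.1),
    ("Encounter-Based Families", s.2.2.2.2.1), ("Auto-Generated Families", s.2.2.2.2.2.1),
    ("Other Families", s.2.2.2.2.2.2)].foldl
      (fun r p => if !p.2.items.isEmpty then r ++ [(p.1, p.2.items)] else r) [])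

-- ===== PRECONDITION & SPEC =====
-- Pre_ requires the family names to be pairwise distinct: the argument is a Python dict, whose
-- association-list representation never repeats a key (on repeated keys the list is not the image
-- of any dict A could receive).
def Pre_categorize_families (families : List (String × String)) : Prop :=
  (families.map Prod.fst).Nodup
instance (families : List (String × String)) : Decidable (Pre_categorize_families families) := by
  unfold Pre_categorize_families; infer_instance

def pvWitness_categorize_families : (List (String × String)) :=
  [("head_injury", "a"), ("toxic_poison", "b"), ("auto_condition", "c"), ("plain", "d")]

def Spec_categorize_families (families : List (String × String)) (out : List (String × List (String × String))) : Prop := out = categorize_families_alt families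
instance (families : List (String × String)) (out : List (String × List (String × String))) : Decidable (Spec_categorize_families families out) := by unfold Spec_categorize_families; infer_instance

-- ===== CLAIM (what is proved, stated in full; the proofs are below) =====
def Claim_equal_categorize_families : Prop := ∀ (families : List (String × String)), Dom_categorize_families families → Pre_categorize_families families → Spec_categorize_families families (categorize_families families)

-- ===== LEMMAS AND PROOFS =====

def pvFF (q : String → Bool) (l : List (String × String)) (d : PySem.Dict String String) : PySem.Dict String String :=
  l.foldl (fun d p => if q p.1 then d.insert p.1 p.2 else d) d

theorem pvFF_contains (q : String → Bool) (l : List (String × String)) (x : String) :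
    ∀ d : PySem.Dict String String, (pvFF q l d).contains x = (d.contains x || (l.any (fun a => a.1 == x) && q x)) := by
  induction l with
  | nil => intro d; simp [pvFF]
  | cons a l ih =>
    intro d
    have step : pvFF q (a :: l) d = pvFF q l (if q a.1 then d.insert a.1 a.2 else d) := by
      simp [pvFF]
    rw [step, ih]
    by_cases he : a.1 = x
    · subst he
      by_cases h : q a.1
      · simp [h]
      · simp [h]
    · have h1 : (x == a.1) = false := beq_eq_false_iff_ne.mpr (fun hh => he hh.symm)
      have h2 : (a.1 == x) = false := beq_eq_false_iff_ne.mpr he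
      by_cases h : q a.1 <;> simp [h, PySem.Dict.contains_insert, h1, h2]

def pInj (n : String) : Bool := PySem.Str.isIn "injury" n || PySem.Str.isIn "fracture" n
def pTox (n : String) : Bool := PySem.Str.isIn "toxic" n || PySem.Str.isIn "poison" n
def pCond (n : String) : Bool := PySem.Str.isIn "condition" n && !pTox n
def pMech (n : String) : Bool := PySem.Str.isIn "mechanism" n
def pEnc (n : String) : Bool := PySem.Str.isIn "encounter" n && !pInj n && !pTox n && !pMech n
def pAuto (n : String) : Bool := PySem.Str.startswith n "auto_"
def pOther (n : String) : Bool := !(pInj n || pTox n || pCond n || pMech n || pEnc n || pAuto n)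

theorem pvFF_congr (q q' : String → Bool) (l : List (String × String))
    (h : ∀ p ∈ l, q p.1 = q' p.1) : ∀ d, pvFF q l d = pvFF q' l d := by
  induction l with
  | nil => intro d; rfl
  | cons a l ih =>
    intro d
    have ha := h a (by simp)
    simp only [pvFF, List.foldl_cons, ha]
    exact ih (fun p hp => h p (by simp [hp])) _

theorem pvOther_eq (cond : PySem.Dict String String → String → Bool) (c : String → Bool)
    (hcond : ∀ (d : PySem.Dict String String) n, d.contains n = false → cond d n = c n) :
    ∀ (l : List (String × String)) (d : PySem.Dict String String),
      (l.map Prod.fst).Nodup → (∀ p ∈ l, d.contains p.1 = false) →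
      l.foldl (fun d p => if cond d p.1 then d else d.insert p.1 p.2) d = pvFF (fun n => !c n) l d := by
  intro l
  induction l with
  | nil => intro d _ _; rfl
  | cons a l ih =>
    intro d hnd hfresh
    rw [List.map_cons] at hnd
    have hnotin := (List.nodup_cons.mp hnd).1
    have hnd2 := (List.nodup_cons.mp hnd).2
    have hda : d.contains a.1 = false := hfresh a (by simp)
    have hstep : cond d a.1 = c a.1 := hcond d a.1 hda
    simp only [List.foldl_cons, pvFF, hstep]
    by_cases hc : c a.1
    · simp only [hc, if_true, Bool.not_true, Bool.false_eq_true, if_false]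
      exact ih d hnd2 (fun p hp => hfresh p (by simp [hp]))
    · have hcf : c a.1 = false := by simpa using hc
      simp only [hcf, Bool.not_false, Bool.false_eq_true, if_false, if_true]
      refine ih _ hnd2 ?_
      intro p hp
      have hne : (p.1 == a.1) = false := beq_eq_false_iff_ne.mpr (fun hh => hnotin (hh ▸ List.mem_map.mpr ⟨p, hp, rfl⟩))
      simp [PySem.Dict.contains_insert, hne, hfresh p (by simp [hp])]


theorem pvB_proj (l : List (String × String)) :
    ∀ s, l.foldl pvBStep s =
      (pvFF pInj l s.1, pvFF pTox l s.2.1, pvFF pCond l s.2.2.1, pvFF pMech l s.2.2.2.1,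
       pvFF pEnc l s.2.2.2.2.1, pvFF pAuto l s.2.2.2.2.2.1, pvFF pOther l s.2.2.2.2.2.2) := by
  induction l with
  | nil => intro s; rfl
  | cons a l ih =>
    intro s
    rw [List.foldl_cons, ih]
    rfl

theorem pv_foldl_filterMap (l : List (String × PySem.Dict String String)) :
    ∀ acc, l.foldl (fun r p => if !p.2.items.isEmpty then r ++ [(p.1, p.2.items)] else r) acc
      = acc ++ (l.filter (fun p => !p.2.items.isEmpty)).map (fun p => (p.1, p.2.items)) := by
  induction l with
  | nil => intro acc; simp
  | cons a l ih =>
    intro acc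
    by_cases h : a.2.items.isEmpty
    · rw [List.foldl_cons, if_neg (by simp [h]), ih]
      simp [h]
    · rw [List.foldl_cons, if_pos (by simp [h]), ih]
      simp [h]

theorem main_eq (fam : List (String × String)) (hpre : (fam.map Prod.fst).Nodup) :
    categorize_families fam = categorize_families_alt fam := by
  have hmem : ∀ p ∈ fam, (fam.any (fun a => a.1 == p.1)) = true :=
    fun p hp => List.any_eq_true.mpr ⟨p, hp, by simp⟩
  have hcont : ∀ (q : String → Bool), ∀ p ∈ fam, (pvFF q fam PySem.Dict.empty).contains p.1 = q p.1 := by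
    intro q p hp
    rw [pvFF_contains]
    simp [hmem p hp]
  have e1 : (fam.foldl (fun d p => if PySem.Str.isIn "injury" p.1 || PySem.Str.isIn "fracture" p.1 then d.insert p.1 p.2 else d) PySem.Dict.empty) = pvFF pInj fam PySem.Dict.empty := rfl
  have e2 : (fam.foldl (fun d p => if PySem.Str.isIn "toxic" p.1 || PySem.Str.isIn "poison" p.1 then d.insert p.1 p.2 else d) PySem.Dict.empty) = pvFF pTox fam PySem.Dict.empty := rfl
  have e4 : (fam.foldl (fun d p => if PySem.Str.isIn "mechanism" p.1 then d.insert p.1 p.2 else d) PySem.Dict.empty) = pvFF pMech fam PySem.Dict.empty := rfl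
  have e6 : (fam.foldl (fun d p => if PySem.Str.startswith p.1 "auto_" then d.insert p.1 p.2 else d) PySem.Dict.empty) = pvFF pAuto fam PySem.Dict.empty := rfl
  have e3 : (fam.foldl (fun d p => if PySem.Str.isIn "condition" p.1 && !((pvFF pTox fam PySem.Dict.empty).contains p.1) then d.insert p.1 p.2 else d) PySem.Dict.empty) = pvFF pCond fam PySem.Dict.empty := by
    show pvFF (fun n => PySem.Str.isIn "condition" n && !((pvFF pTox fam PySem.Dict.empty).contains n)) fam PySem.Dict.empty = pvFF pCond fam PySem.Dict.empty
    exact pvFF_congr _ _ fam (fun p hp => by rw [hcont pTox p hp]; rfl) _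
  have e5 : (fam.foldl (fun d p => if PySem.Str.isIn "encounter" p.1 && !((pvFF pInj fam PySem.Dict.empty).contains p.1) && !((pvFF pTox fam PySem.Dict.empty).contains p.1) && !((pvFF pMech fam PySem.Dict.empty).contains p.1) then d.insert p.1 p.2 else d) PySem.Dict.empty) = pvFF pEnc fam PySem.Dict.empty := by
    show pvFF (fun n => PySem.Str.isIn "encounter" n && !((pvFF pInj fam PySem.Dict.empty).contains n) && !((pvFF pTox fam PySem.Dict.empty).contains n) && !((pvFF pMech fam PySem.Dict.empty).contains n)) fam PySem.Dict.empty = pvFF pEnc fam PySem.Dict.empty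
    exact pvFF_congr _ _ fam (fun p hp => by rw [hcont pInj p hp, hcont pTox p hp, hcont pMech p hp]; rfl) _
  have h7 := pvOther_eq
      (fun d n => (pvFF pInj fam PySem.Dict.empty).contains n || (pvFF pTox fam PySem.Dict.empty).contains n || (pvFF pCond fam PySem.Dict.empty).contains n || (pvFF pMech fam PySem.Dict.empty).contains n || (pvFF pEnc fam PySem.Dict.empty).contains n || (pvFF pAuto fam PySem.Dict.empty).contains n || d.contains n)
      (fun n => (pvFF pInj fam PySem.Dict.empty).contains n || (pvFF pTox fam PySem.Dict.empty).contains n || (pvFF pCond fam PySem.Dict.empty).contains n || (pvFF pMech fam PySem.Dict.empty).contains n || (pvFF pEnc fam PySem.Dict.empty).contains n || (pvFF pAuto fam PySem.Dict.empty).contains n)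
      (by intro d n hd; simp [hd])
      fam PySem.Dict.empty hpre (by simp)
  have hcg : pvFF (fun n => !((pvFF pInj fam PySem.Dict.empty).contains n || (pvFF pTox fam PySem.Dict.empty).contains n || (pvFF pCond fam PySem.Dict.empty).contains n || (pvFF pMech fam PySem.Dict.empty).contains n || (pvFF pEnc fam PySem.Dict.empty).contains n || (pvFF pAuto fam PySem.Dict.empty).contains n)) fam PySem.Dict.empty = pvFF pOther fam PySem.Dict.empty := by
    refine pvFF_congr _ _ fam ?_ _
    intro p hp
    simp only [hcont pInj p hp, hcont pTox p hp, hcont pCond p hp, hcont pMech p hp, hcont pEnc p hp, hcont pAuto p hp]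
    rfl
  have e7 : (fam.foldl (fun d p =>
      if (pvFF pInj fam PySem.Dict.empty).contains p.1 || (pvFF pTox fam PySem.Dict.empty).contains p.1 || (pvFF pCond fam PySem.Dict.empty).contains p.1 || (pvFF pMech fam PySem.Dict.empty).contains p.1 || (pvFF pEnc fam PySem.Dict.empty).contains p.1 || (pvFF pAuto fam PySem.Dict.empty).contains p.1 || d.contains p.1
      then d else d.insert p.1 p.2) PySem.Dict.empty) = pvFF pOther fam PySem.Dict.empty := h7.trans hcg
  simp only [categorize_families, categorize_families_alt]
  rw [e1, e2, e4, e6, e3, e5, e7, pvB_proj fam]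
  rw [pv_foldl_filterMap]
  rfl

-- ===== VERDICT (by name: the statement is the Claim_ definition above) =====
theorem categorize_families_spec : Claim_equal_categorize_families := by
  intro families _ hpre
  exact main_eq families hpre
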